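-- pv_equiv track=rewrite | github.com/evgeniy-kulikov/unified-state-exam | 25/task_25_01.py | fn
-- ===== SOURCE A (Python) =====
-- def fn(n):
--     d = set()
--     for i in range(1, int(n ** 0.5) + 1):
--         if not n % i:
--             d.add(i)
--             d.add(n // i)
--     res = [i for i in d if not i % 2]
--     if len(res) == 4:
--         return sorted(res)
-- ===== SOURCE B (Python) =====
-- def fn(n):
--     # Return value only; even divisors of n are exactly 2*k for k a divisor of n//2.
--     if n <= 0 or n % 2:
--         return None
--     m = n // 2
--     small, large = [], []
--     k = 1
--     while k * k <= m:
--         if m % k == 0: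
--             small.append(2 * k)
--             if k != m // k:
--                 large.append(2 * (m // k))
--         k += 1
--     res = small + large[::-1]
--     if len(res) == 4:
--         return res
--     return None
-- ===== Notes on version B (the rewrite author's own statement) =====
-- stated objective: alternative
-- what changed: B drops A's float-sqrt/set/sorted machinery: it reduces the problem to the divisors of n//2 (even divisors of n are exactly their doubles), collects them in ascending order with two lists during one sqrt-bounded while-loop, so no set and no final sort are needed; on n < 0, where A raises, B returns None.
import Mathlib
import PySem

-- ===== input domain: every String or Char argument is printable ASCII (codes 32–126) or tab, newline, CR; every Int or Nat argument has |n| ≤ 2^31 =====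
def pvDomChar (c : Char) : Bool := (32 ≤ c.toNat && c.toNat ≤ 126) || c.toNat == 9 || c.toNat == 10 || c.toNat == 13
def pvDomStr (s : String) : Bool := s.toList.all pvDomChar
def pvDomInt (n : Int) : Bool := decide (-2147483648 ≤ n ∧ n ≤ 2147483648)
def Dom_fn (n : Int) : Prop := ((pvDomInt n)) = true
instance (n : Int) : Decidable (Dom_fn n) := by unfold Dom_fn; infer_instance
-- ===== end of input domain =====

-- B replaces A's √n divisor-pair set + filter + sort by a direct in-order enumeration of the
-- even divisors (2k for k dividing n//2), producing the list already sorted; return value only.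

-- ===== PORT A =====
-- int(n ** 0.5) is exactly Int.sqrt n on 0 ≤ n ≤ 2^31 (double-precision sqrt is exact there);
-- for n < 0 Python raises TypeError (int of a complex), excluded by Pre_fn.
def fn (n : Int) : Option (List Int) :=
  let d : PySem.Set Int :=
    (PySem.List.pyRange 1 (Int.sqrt n + 1) 1).foldl
      (fun d i =>
        if PySem.Int.mod n i = 0 then
          PySem.Set.add (PySem.Set.add d i) (PySem.Int.floordiv n i)
        else d)
      PySem.Set.empty
  -- res is consumed only by len() and sorted(): both independent of the set's iteration order
  let res : List Int := d.filter (fun i => decide (PySem.Int.mod i 2 = 0))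
  if res.length = 4 then some (PySem.List.sorted res (fun x => x) false) else none

-- ===== PORT B =====
-- termination helper: k*k ≤ m forces k ≤ m
theorem bLoop_k_le (m k : Int) (h : k * k ≤ m) : k ≤ m := by
  by_cases hk : k ≤ 0
  · nlinarith [mul_self_nonneg k]
  · have hk' : 0 < k := by omega
    nlinarith

-- the 'while k * k <= m' loop of B, carrying the two accumulator lists
def bLoop (m k : Int) (small large : List Int) : List Int × List Int :=
  if h : k * k ≤ m then
    if PySem.Int.mod m k = 0 then
      if k ≠ PySem.Int.floordiv m k then
        bLoop m (k + 1) (small ++ [2 * k]) (large ++ [2 * PySem.Int.floordiv m k])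
      else
        bLoop m (k + 1) (small ++ [2 * k]) large
    else
      bLoop m (k + 1) small large
  else
    (small, large)
termination_by (m + 1 - k).toNat
decreasing_by
  all_goals (have := bLoop_k_le m k h; omega)

def fn_alt (n : Int) : Option (List Int) :=
  if n ≤ 0 ∨ PySem.Int.mod n 2 ≠ 0 then none
  else
    let m := PySem.Int.floordiv n 2
    let p := bLoop m 1 [] []
    -- large[::-1]; step -1 never raises, so getD is exact (slice?_none_none_neg_one)
    let res := p.1 ++ (PySem.List.slice? p.2 none none (-1)).getD []
    if res.length = 4 then some res else none

-- ===== PRECONDITION & SPEC =====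
-- Pre_fn excludes n < 0, on which A raises TypeError (int() of the complex (n ** 0.5)).
def Pre_fn (n : Int) : Prop := 0 ≤ n
instance (n : Int) : Decidable (Pre_fn n) := by unfold Pre_fn; infer_instance
def pvWitness_fn : Int := 12

def Spec_fn (n : Int) (out : Option (List Int)) : Prop := out = fn_alt n
instance (n : Int) (out : Option (List Int)) : Decidable (Spec_fn n out) := by unfold Spec_fn; infer_instance

-- ===== CLAIM (what is proved, stated in full; the proofs are below) =====
def Claim_equal_fn : Prop := ∀ (n : Int), Dom_fn n → Pre_fn n → Spec_fn n (fn n)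


-- ===== LEMMAS AND PROOFS =====

-- the common specification: the even divisors of n in increasing order
def EDiv (n : Int) : List Int :=
  (PySem.List.pyRange 1 (n + 1) 1).filter (fun d => decide (d ∣ n ∧ PySem.Int.mod d 2 = 0))

theorem le_sqrt_iff {v k : Int} (hv : 0 ≤ v) (hk : 1 ≤ k) : k ≤ Int.sqrt v ↔ k * k ≤ v := by
  rw [Int.sqrt]
  have hkt : (k.toNat : Int) = k := Int.toNat_of_nonneg (by omega)
  have hvt : (v.toNat : Int) = v := Int.toNat_of_nonneg hv
  have h := Nat.le_sqrt (m := k.toNat) (n := v.toNat)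
  constructor
  · intro h2
    have h3 : k.toNat ≤ Nat.sqrt v.toNat := by omega
    have h5 : ((k.toNat * k.toNat : Nat) : Int) ≤ ((v.toNat : Nat) : Int) := by
      exact_mod_cast h.mp h3
    push_cast at h5
    rw [hkt, hvt] at h5
    exact h5
  · intro h2
    have h5 : ((k.toNat * k.toNat : Nat) : Int) ≤ ((v.toNat : Nat) : Int) := by
      push_cast
      rw [hkt, hvt]
      exact h2
    have h4 : k.toNat * k.toNat ≤ v.toNat := by exact_mod_cast h5
    have h3 := h.mpr h4
    omega

theorem lt_sqrt_succ_sq {v : Int} (hv : 0 ≤ v) : v < (Int.sqrt v + 1) * (Int.sqrt v + 1) := by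
  rw [Int.sqrt]
  have hvt : (v.toNat : Int) = v := Int.toNat_of_nonneg hv
  have h := Nat.lt_succ_sqrt v.toNat
  have h5 : ((v.toNat : Nat) : Int) <
      (((Nat.sqrt v.toNat).succ * (Nat.sqrt v.toNat).succ : Nat) : Int) := by exact_mod_cast h
  push_cast [Nat.succ_eq_add_one] at h5
  rw [hvt] at h5
  exact h5

-- the sqrt-v pairing: j up to sqrt v together with its cofactor v/j reach exactly the divisors
theorem pairing {v : Int} (hv : 0 ≤ v) (x : Int) :
    (∃ j, 1 ≤ j ∧ j ≤ Int.sqrt v ∧ j ∣ v ∧ (x = j ∨ x = v / j)) ↔ (1 ≤ x ∧ x ≤ v ∧ x ∣ v) := by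
  constructor
  · rintro ⟨j, hj1, hjs, hjd, hx⟩
    have hjj : j * j ≤ v := (le_sqrt_iff hv hj1).mp hjs
    have hvpos : 0 < v := lt_of_lt_of_le (mul_pos (by omega) (by omega)) hjj
    have hdq : v / j ∣ v := ⟨j, (Int.ediv_mul_cancel hjd).symm⟩
    rcases hx with rfl | rfl
    · exact ⟨hj1, Int.le_of_dvd hvpos hjd, hjd⟩
    · exact ⟨(Int.le_ediv_iff_mul_le (by omega)).mpr
        (by nlinarith), Int.le_of_dvd hvpos hdq, hdq⟩
  · rintro ⟨hx1, hxv, hxd⟩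
    have hvpos : 0 < v := by omega
    by_cases hxs : x ≤ Int.sqrt v
    · exact ⟨x, hx1, hxs, hxd, Or.inl rfl⟩
    · have hx0 : 0 < x := by omega
      have hmul : v / x * x = v := Int.ediv_mul_cancel hxd
      have hq1 : 1 ≤ v / x := (Int.le_ediv_iff_mul_le hx0).mpr (by omega)
      have hqd : v / x ∣ v := ⟨x, hmul.symm⟩
      have hs0 : 0 ≤ Int.sqrt v := Int.sqrt_nonneg v
      have hqs : v / x ≤ Int.sqrt v := by
        by_contra hcon
        replace hcon : Int.sqrt v < v / x := not_le.mp hcon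
        have hmm : (Int.sqrt v + 1) * (Int.sqrt v + 1) ≤ v / x * x :=
          mul_le_mul (by omega) (by omega) (by omega) (by omega)
        rw [hmul] at hmm
        have := lt_sqrt_succ_sq hv
        omega
      have hxeq : x = v / (v / x) := by
        have hq0 : v / x ≠ 0 := by omega
        calc x = v / x * x / (v / x) := by rw [Int.mul_ediv_cancel_left _ hq0]
        _ = v / (v / x) := by rw [hmul]
      exact ⟨v / x, hq1, hqs, hqd, Or.inr hxeq⟩

theorem mem_EDiv {n x : Int} : x ∈ EDiv n ↔ 1 ≤ x ∧ x ≤ n ∧ x ∣ n ∧ PySem.Int.mod x 2 = 0 := by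
  unfold EDiv
  simp only [List.mem_filter, PySem.List.mem_pyRange_one, decide_eq_true_eq]
  constructor
  · rintro ⟨⟨h1, h2⟩, h3, h4⟩
    exact ⟨h1, by omega, h3, h4⟩
  · rintro ⟨h1, h2, h3, h4⟩
    exact ⟨⟨h1, by omega⟩, h3, h4⟩

theorem pairwise_EDiv (n : Int) : (EDiv n).Pairwise (· < ·) :=
  List.Pairwise.filter _ (PySem.List.pairwise_lt_pyRange_one 1 (n + 1))

theorem eq_of_mem_iff_pairwise_lt {l1 l2 : List Int} (h1 : l1.Pairwise (· < ·))
    (h2 : l2.Pairwise (· < ·)) (hm : ∀ x, x ∈ l1 ↔ x ∈ l2) : l1 = l2 := by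
  have nd1 : l1.Nodup := h1.imp (fun h => ne_of_lt h)
  have nd2 : l2.Nodup := h2.imp (fun h => ne_of_lt h)
  have hp : l1.Perm l2 := (List.perm_ext_iff_of_nodup nd1 nd2).mpr hm
  exact List.Perm.eq_of_pairwise (fun a b _ _ h h' => le_antisymm h h')
    (h1.imp le_of_lt) (h2.imp le_of_lt) hp

-- A's divisor set, named for the proofs
def dA (n : Int) : PySem.Set Int :=
  (PySem.List.pyRange 1 (Int.sqrt n + 1) 1).foldl
    (fun d i =>
      if PySem.Int.mod n i = 0 then
        PySem.Set.add (PySem.Set.add d i) (PySem.Int.floordiv n i)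
      else d)
    PySem.Set.empty

theorem fn_def (n : Int) :
    fn n = (if ((dA n).filter (fun i => decide (PySem.Int.mod i 2 = 0))).length = 4 then
      some (PySem.List.sorted ((dA n).filter (fun i => decide (PySem.Int.mod i 2 = 0)))
        (fun x => x) false) else none) := rfl

theorem memA (n : Int) (l : List Int) (s : PySem.Set Int) (x : Int) :
    x ∈ l.foldl
      (fun d i =>
        if PySem.Int.mod n i = 0 then
          PySem.Set.add (PySem.Set.add d i) (PySem.Int.floordiv n i)
        else d) s
    ↔ x ∈ s ∨ ∃ i ∈ l, PySem.Int.mod n i = 0 ∧ (x = i ∨ x = PySem.Int.floordiv n i) := by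
  induction l generalizing s with
  | nil => simp
  | cons i l ih =>
    simp only [List.foldl_cons]
    rw [ih]
    by_cases hc : PySem.Int.mod n i = 0 <;>
      simp [hc, PySem.Set.mem_add, or_assoc]

theorem nodupA (n : Int) (l : List Int) (s : PySem.Set Int) (hs : s.Nodup) :
    (l.foldl
      (fun d i =>
        if PySem.Int.mod n i = 0 then
          PySem.Set.add (PySem.Set.add d i) (PySem.Int.floordiv n i)
        else d) s).Nodup := by
  induction l generalizing s with
  | nil => simpa
  | cons i l ih =>
    simp only [List.foldl_cons]
    apply ih
    by_cases hc : PySem.Int.mod n i = 0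
    · simpa [hc] using PySem.Set.nodup_add _ _ (PySem.Set.nodup_add _ _ hs)
    · simpa [hc] using hs

theorem mem_dA (n : Int) (hn : 0 < n) (x : Int) :
    x ∈ dA n ↔ 1 ≤ x ∧ x ≤ n ∧ x ∣ n := by
  unfold dA
  rw [memA]
  rw [← pairing hn.le x]
  simp only [PySem.Set.empty, List.not_mem_nil, false_or]
  constructor
  · rintro ⟨i, hi, hmod, hx⟩
    rw [PySem.List.mem_pyRange_one] at hi
    have hi1 : 1 ≤ i := hi.1
    have hdvd : i ∣ n := (PySem.Int.mod_eq_zero_iff_dvd n i).mp hmod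
    refine ⟨i, hi1, by omega, hdvd, ?_⟩
    rcases hx with rfl | rfl
    · exact Or.inl rfl
    · exact Or.inr (by rw [PySem.Int.floordiv_eq_ediv_of_pos (by omega)])
  · rintro ⟨j, hj1, hjs, hjd, hx⟩
    refine ⟨j, ?_, (PySem.Int.mod_eq_zero_iff_dvd n j).mpr hjd, ?_⟩
    · rw [PySem.List.mem_pyRange_one]
      exact ⟨hj1, by omega⟩
    · rcases hx with rfl | rfl
      · exact Or.inl rfl
      · exact Or.inr (by rw [PySem.Int.floordiv_eq_ediv_of_pos (by omega)])

-- A computes: the sorted even divisors, provided there are exactly four of them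
theorem fnA_eq (n : Int) (hn : 0 < n) :
    fn n = if (EDiv n).length = 4 then some (EDiv n) else none := by
  rw [fn_def]
  have hnd : (dA n).Nodup := nodupA n _ _ List.nodup_nil
  have hmemr : ∀ x, x ∈ (dA n).filter (fun i => decide (PySem.Int.mod i 2 = 0)) ↔ x ∈ EDiv n := by
    intro x
    rw [List.mem_filter, mem_EDiv, mem_dA n hn, decide_eq_true_eq]
    tauto
  have hndr : ((dA n).filter (fun i => decide (PySem.Int.mod i 2 = 0))).Nodup := hnd.filter _
  have hperm : (EDiv n).Perm ((dA n).filter (fun i => decide (PySem.Int.mod i 2 = 0))) :=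
    (List.perm_ext_iff_of_nodup ((pairwise_EDiv n).imp (fun h => ne_of_lt h)) hndr).mpr
      (fun x => (hmemr x).symm)
  have hsort := PySem.List.sorted_eq_of_perm_of_pairwise_lt _ _ (fun x => x) hperm (pairwise_EDiv n)
  rw [hsort, ← hperm.length_eq]

-- closed form of B's loop
theorem bLoop_eq (m : Int) (hm : 0 ≤ m) (N : Nat) :
    ∀ (k : Int) (s l : List Int), 1 ≤ k → (Int.sqrt m + 1 - k).toNat ≤ N →
    bLoop m k s l =
      (s ++ ((PySem.List.pyRange k (Int.sqrt m + 1) 1).filter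
          (fun j => decide (j ∣ m))).map (fun j => 2 * j),
       l ++ ((PySem.List.pyRange k (Int.sqrt m + 1) 1).filter
          (fun j => decide (j ∣ m ∧ j ≠ m / j))).map (fun j => 2 * (m / j))) := by
  induction N with
  | zero =>
    intro k s l hk hN
    have hnc : ¬ k * k ≤ m := fun hc => by
      have := (le_sqrt_iff hm hk).mpr hc
      omega
    rw [bLoop, dif_neg hnc, PySem.List.pyRange_one_eq_nil (by omega)]
    simp
  | succ N ih =>
    intro k s l hk hN
    by_cases hc : k * k ≤ m
    · have hks : k ≤ Int.sqrt m := (le_sqrt_iff hm hk).mpr hc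
      have hfd : PySem.Int.floordiv m k = m / k := PySem.Int.floordiv_eq_ediv_of_pos (by omega)
      rw [bLoop, dif_pos hc, PySem.List.pyRange_one_cons (by omega : k < Int.sqrt m + 1)]
      by_cases hd : PySem.Int.mod m k = 0
      · have hdvd : k ∣ m := (PySem.Int.mod_eq_zero_iff_dvd m k).mp hd
        rw [if_pos hd]
        by_cases hne : k = PySem.Int.floordiv m k
        · rw [if_neg (by simpa using hne)]
          rw [ih (k + 1) _ _ (by omega) (by omega)]
          rw [hfd] at hne
          simp [hdvd, ← hne]
        · rw [if_pos (by simpa using hne)]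
          rw [ih (k + 1) _ _ (by omega) (by omega)]
          rw [hfd] at hne
          simp [hdvd, hne, hfd]
      · have hnd : ¬ k ∣ m := fun h => hd ((PySem.Int.mod_eq_zero_iff_dvd m k).mpr h)
        rw [if_neg hd, ih (k + 1) _ _ (by omega) (by omega)]
        simp [hnd]
    · have hns : ¬ k ≤ Int.sqrt m := fun h => hc ((le_sqrt_iff hm hk).mp h)
      rw [bLoop, dif_neg hc, PySem.List.pyRange_one_eq_nil (by omega)]
      simp

-- B's two lists, concatenated, are exactly the even divisors of 2*m in order
theorem B_list_eq (m : Int) (hm : 1 ≤ m) :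
    ((PySem.List.pyRange 1 (Int.sqrt m + 1) 1).filter
        (fun j => decide (j ∣ m))).map (fun j => 2 * j) ++
      (((PySem.List.pyRange 1 (Int.sqrt m + 1) 1).filter
        (fun j => decide (j ∣ m ∧ j ≠ m / j))).map (fun j => 2 * (m / j))).reverse
    = EDiv (2 * m) := by
  have hm0 : (0:Int) < m := by omega
  have hs1 : 1 ≤ Int.sqrt m := (le_sqrt_iff (by omega) le_rfl).mpr (by omega)
  have hss : Int.sqrt m * Int.sqrt m ≤ m := (le_sqrt_iff (by omega) hs1).mp le_rfl
  -- element facts for members of the filtered ranges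
  have hfacts : ∀ j : Int, j ∈ (PySem.List.pyRange 1 (Int.sqrt m + 1) 1).filter
      (fun j => decide (j ∣ m ∧ j ≠ m / j)) →
      1 ≤ j ∧ j ≤ Int.sqrt m ∧ j ∣ m ∧ j ≠ m / j := by
    intro j hj
    rw [List.mem_filter, PySem.List.mem_pyRange_one, decide_eq_true_eq] at hj
    exact ⟨hj.1.1, by omega, hj.2.1, hj.2.2⟩
  have hbig : ∀ j : Int, 1 ≤ j → j ≤ Int.sqrt m → j ∣ m → j ≠ m / j → Int.sqrt m < m / j := by
    intro b hb1 hbs hbd hbne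
    have hmb : m / b * b = m := Int.ediv_mul_cancel hbd
    have hqb : 1 ≤ m / b := (Int.le_ediv_iff_mul_le (by omega)).mpr
      (by have := Int.le_of_dvd hm0 hbd; omega)
    by_contra hcon
    replace hcon : m / b ≤ Int.sqrt m := not_lt.mp hcon
    rcases lt_or_gt_of_ne hbne with h | h
    · have h1 : m / b * b ≤ Int.sqrt m * (Int.sqrt m - 1) :=
        mul_le_mul hcon (by omega) (by omega) (by omega)
      rw [hmb] at h1
      nlinarith
    · have h1 : m / b * b ≤ (Int.sqrt m - 1) * Int.sqrt m :=
        mul_le_mul (by omega) hbs (by omega) (by omega)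
      rw [hmb] at h1
      nlinarith
  apply eq_of_mem_iff_pairwise_lt _ (pairwise_EDiv _)
  · intro x
    rw [List.mem_append, mem_EDiv, List.mem_reverse]
    simp only [List.mem_map, List.mem_filter, PySem.List.mem_pyRange_one, decide_eq_true_eq]
    constructor
    · rintro (⟨j, ⟨⟨hj1, hjlt⟩, hjd⟩, rfl⟩ | ⟨j, ⟨⟨hj1, hjlt⟩, hjd, hne⟩, rfl⟩)
      · obtain ⟨he1, hem, hed⟩ := (pairing (by omega) j).mp ⟨j, hj1, by omega, hjd, Or.inl rfl⟩
        exact ⟨by omega, by omega, mul_dvd_mul_left 2 hed,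
          (PySem.Int.mod_eq_zero_iff_dvd _ 2).mpr ⟨j, rfl⟩⟩
      · obtain ⟨he1, hem, hed⟩ :=
          (pairing (by omega) (m / j)).mp ⟨j, hj1, by omega, hjd, Or.inr rfl⟩
        exact ⟨by omega, by omega, mul_dvd_mul_left 2 hed,
          (PySem.Int.mod_eq_zero_iff_dvd _ 2).mpr ⟨m / j, rfl⟩⟩
    · rintro ⟨hx1, hxm, hxd, hxe⟩
      obtain ⟨e, rfl⟩ : ∃ e, x = 2 * e := (PySem.Int.mod_eq_zero_iff_dvd x 2).mp hxe
      have hed : e ∣ m := (mul_dvd_mul_iff_left (by norm_num : (2:Int) ≠ 0)).mp hxd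
      obtain ⟨j, hj1, hjs, hjd, hx⟩ :=
        (pairing (by omega : (0:Int) ≤ m) e).mpr ⟨by omega, by omega, hed⟩
      rcases hx with rfl | rfl
      · exact Or.inl ⟨e, ⟨⟨hj1, by omega⟩, hjd⟩, rfl⟩
      · by_cases hne : j = m / j
        · exact Or.inl ⟨j, ⟨⟨hj1, by omega⟩, hjd⟩, by rw [← hne]⟩
        · exact Or.inr ⟨j, ⟨⟨hj1, by omega⟩, hjd, hne⟩, rfl⟩
  · rw [List.pairwise_append]
    refine ⟨?_, ?_, ?_⟩
    · rw [List.pairwise_map]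
      exact (List.Pairwise.filter _ (PySem.List.pairwise_lt_pyRange_one 1 (Int.sqrt m + 1))).imp
        (fun h => by omega)
    · rw [List.pairwise_reverse, List.pairwise_map]
      refine List.Pairwise.imp_of_mem ?_
        (List.Pairwise.filter _ (PySem.List.pairwise_lt_pyRange_one 1 (Int.sqrt m + 1)))
      intro a b ha hb hab
      obtain ⟨ha1, _, had, _⟩ := hfacts a ha
      obtain ⟨hb1, hbs, hbd, hbne⟩ := hfacts b hb
      have hma : m / a * a = m := Int.ediv_mul_cancel had
      have hmb : m / b * b = m := Int.ediv_mul_cancel hbd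
      have hqb : 1 ≤ m / b := (Int.le_ediv_iff_mul_le (by omega)).mpr
        (by have := Int.le_of_dvd hm0 hbd; omega)
      have hlt : m / b < m / a := by
        by_contra hcon
        replace hcon : m / a ≤ m / b := not_lt.mp hcon
        have h1 : m / a * a ≤ m / b * a := mul_le_mul_of_nonneg_right hcon (by omega)
        have h2 : m / b * (a + 1) ≤ m / b * b := mul_le_mul_of_nonneg_left (by omega) (by omega)
        rw [hma] at h1
        rw [hmb] at h2
        have h3 : m / b * (a + 1) = m / b * a + m / b := by ring
        linarith
      omega
    · intro x hx y hy
      rw [List.mem_map] at hx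
      rw [List.mem_reverse, List.mem_map] at hy
      obtain ⟨a, ha, rfl⟩ := hx
      obtain ⟨b, hb, rfl⟩ := hy
      rw [List.mem_filter, PySem.List.mem_pyRange_one, decide_eq_true_eq] at ha
      obtain ⟨hb1, hbs, hbd, hbne⟩ := hfacts b hb
      have := hbig b hb1 hbs hbd hbne
      have has : a ≤ Int.sqrt m := by omega
      omega

-- B computes: the even divisors in increasing order, if there are exactly four
theorem fnB_eq (n : Int) (hn : 0 < n) :
    fn_alt n = if (EDiv n).length = 4 then some (EDiv n) else none := by
  by_cases h2 : (2:Int) ∣ n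
  · obtain ⟨m, rfl⟩ := h2
    have hm1 : 1 ≤ m := by omega
    have hmod : PySem.Int.mod (2 * m) 2 = 0 :=
      (PySem.Int.mod_eq_zero_iff_dvd _ 2).mpr ⟨m, rfl⟩
    have hfd : PySem.Int.floordiv (2 * m) 2 = m := by
      rw [PySem.Int.floordiv_eq_ediv_of_pos (by omega)]
      exact Int.mul_ediv_cancel_left m (by omega)
    unfold fn_alt
    rw [if_neg (by rintro (h | h) <;> omega)]
    simp only [hfd]
    rw [bLoop_eq m (by omega) (Int.sqrt m + 1 - 1).toNat 1 [] [] le_rfl le_rfl]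
    simp only [List.nil_append, PySem.List.slice?_none_none_neg_one, Option.getD_some]
    rw [B_list_eq m hm1]
  · have hmod : PySem.Int.mod n 2 ≠ 0 := by
      rw [Ne, PySem.Int.mod_eq_zero_iff_dvd]
      exact h2
    have hE : EDiv n = [] := by
      apply List.filter_eq_nil_iff.mpr
      intro a _
      simp only [decide_eq_true_eq, not_and]
      intro had hae
      exact h2 (dvd_trans ((PySem.Int.mod_eq_zero_iff_dvd a 2).mp hae) had)
    unfold fn_alt
    rw [if_pos (Or.inr hmod), hE]
    simp

-- ===== VERDICT (by name: the statement is the Claim_ definition above) =====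
theorem fn_spec : Claim_equal_fn := by
  intro n _ hpre
  unfold Spec_fn
  rcases (hpre : (0:Int) ≤ n).lt_or_eq with hn | hn
  · rw [fnA_eq n hn, fnB_eq n hn]
  · rw [← hn]; decide
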